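-- pv_equiv track=rewrite | github.com/lore-2001/AED1-IP | guia7.py | es_matriz
-- ===== SOURCE A (Python) =====
-- def es_matriz (s:list[list[int]]) -> bool:
--     if s == []:
--         res = False
--     else:
--         largoprimerafila : int = len(s[0])
--         if largoprimerafila == 0:
--             res= False
--         else:
--             res = True
--     for fila in s:
--         if len(fila) != largoprimerafila:
--             res = False
--     return res
-- ===== SOURCE B (Python) =====
-- def es_matriz(s: list[list[int]]) -> bool:
--     L = {len(fila) for fila in s}
--     return len(L) == 1 and 0 not in L
-- ===== Notes on version B (the rewrite author's own statement) =====
-- stated objective: idiomatic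
-- what changed: Replaces the reference-length-plus-mutable-flag loop with building the set of distinct row lengths and checking it is exactly one nonzero length.
import Mathlib
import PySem

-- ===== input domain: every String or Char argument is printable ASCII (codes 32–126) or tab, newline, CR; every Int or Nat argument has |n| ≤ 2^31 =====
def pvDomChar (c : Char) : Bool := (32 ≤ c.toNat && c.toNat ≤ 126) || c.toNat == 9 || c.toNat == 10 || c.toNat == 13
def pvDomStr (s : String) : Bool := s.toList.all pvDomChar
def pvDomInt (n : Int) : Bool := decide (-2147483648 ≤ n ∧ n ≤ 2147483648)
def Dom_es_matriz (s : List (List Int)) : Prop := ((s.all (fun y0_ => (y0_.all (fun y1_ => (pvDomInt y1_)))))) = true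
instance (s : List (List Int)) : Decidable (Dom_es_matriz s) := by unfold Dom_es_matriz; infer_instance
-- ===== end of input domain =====

-- ===== PORT A =====
-- A: remember the first row's length, set a flag, sweep all rows resetting it on a mismatch.
def es_matriz (s : List (List Int)) : Bool :=
  match s with
  | [] => false
  | f :: _ =>
    let largoprimerafila := f.length
    let res := if largoprimerafila = 0 then false else true
    s.foldl (fun res fila => if fila.length ≠ largoprimerafila then false else res) res

-- ===== PORT B =====
-- B: build the set of distinct row lengths; a matrix has exactly one length and it is nonzero.
def es_matriz_alt (s : List (List Int)) : Bool :=
  let L := PySem.Set.ofList (s.map List.length)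
  decide (L.length = 1) && !(PySem.Set.contains L 0)

-- ===== PRECONDITION & SPEC =====
def Spec_es_matriz (s : List (List Int)) (out : Bool) : Prop := out = es_matriz_alt s
instance (s : List (List Int)) (out : Bool) : Decidable (Spec_es_matriz s out) := by unfold Spec_es_matriz; infer_instance

-- ===== CLAIM (what is proved, stated in full; the proofs are below) =====
def Claim_equal_es_matriz : Prop := ∀ (s : List (List Int)), Dom_es_matriz s → Spec_es_matriz s (es_matriz s)

-- ===== LEMMAS AND PROOFS =====

-- A's flag loop computes: initial flag AND every row matches the reference length.
theorem esm_fold_char (t : List (List Int)) (lp : Nat) (r : Bool) :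
    t.foldl (fun res fila => if fila.length ≠ lp then false else res) r
      = (r && t.all (fun fila => fila.length == lp)) := by
  induction t generalizing r with
  | nil => simp
  | cons x xs ih =>
    simp only [List.foldl_cons, List.all_cons, ih]
    by_cases h : x.length = lp <;> simp [h]

-- set of a cons has one element iff every later element equals the head.
theorem esm_ofList_len_one {α : Type} [DecidableEq α] (a : α) (l : List α) :
    (PySem.Set.ofList (a :: l)).length = 1 ↔ ∀ x ∈ l, x = a := by
  rw [PySem.Set.ofList_cons]
  simp only [List.length_cons, Nat.add_eq_one_iff]
  constructor
  · rintro h x hx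
    have hnil : PySem.Set.discard (PySem.Set.ofList l) a = [] := by
      rcases h with ⟨h1, _⟩ | ⟨h1, _⟩
      · exact List.length_eq_zero_iff.mp h1
      · omega
    by_contra hne
    have : x ∈ PySem.Set.discard (PySem.Set.ofList l) a := by
      rw [PySem.Set.mem_discard, PySem.Set.mem_ofList]; exact ⟨hx, hne⟩
    simp [hnil] at this
  · intro h
    left
    refine ⟨?_, trivial⟩
    rw [List.length_eq_zero_iff, List.eq_nil_iff_forall_not_mem]
    intro x hx
    rw [PySem.Set.mem_discard, PySem.Set.mem_ofList] at hx
    exact hx.2 (h x hx.1)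

-- ===== VERDICT (by name: the statement is the Claim_ definition above) =====
theorem es_matriz_spec : Claim_equal_es_matriz := by
  intro s _
  unfold Spec_es_matriz es_matriz es_matriz_alt
  match s with
  | [] => rfl
  | f :: rest =>
    simp only [esm_fold_char, List.map_cons]
    by_cases hall : ∀ x ∈ rest, x.length = f.length
    · have h1 : ((f :: rest).all (fun fila => fila.length == f.length)) = true := by
        simp [List.all_cons, List.all_eq_true]
        intro x hx; exact hall x hx
      have h2 : (PySem.Set.ofList (f.length :: rest.map List.length)).length = 1 := by
        rw [esm_ofList_len_one]
        intro x hx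
        rcases List.mem_map.mp hx with ⟨row, hrow, rfl⟩
        exact hall row hrow
      have hmem : ((0 : Nat) ∈ PySem.Set.ofList (f.length :: rest.map List.length)) ↔ f.length = 0 := by
        rw [PySem.Set.mem_ofList]
        simp only [List.mem_cons, List.mem_map]
        constructor
        · rintro (h | ⟨row, hrow, hl⟩)
          · omega
          · have := hall row hrow; omega
        · intro h; exact Or.inl h.symm
      have h3 : PySem.Set.contains (PySem.Set.ofList (f.length :: rest.map List.length)) 0
          = decide (f.length = 0) := by
        by_cases h0 : f.length = 0 <;> simp [PySem.Set.contains, hmem, h0]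
      simp only [h1, h2, h3]
      by_cases h0 : f.length = 0 <;> simp [h0]
    · push Not at hall
      rcases hall with ⟨x, hx, hne⟩
      have h1 : ((f :: rest).all (fun fila => fila.length == f.length)) = false := by
        rw [Bool.eq_false_iff]
        intro h
        exact hne (by simpa using List.all_eq_true.mp h x (List.mem_cons_of_mem _ hx))
      have h2 : (PySem.Set.ofList (f.length :: rest.map List.length)).length ≠ 1 := by
        rw [Ne, esm_ofList_len_one]
        intro h
        exact hne (h x.length (List.mem_map.mpr ⟨x, hx, rfl⟩))
      simp [h1, h2]
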